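-- pv_equiv track=rewrite | github.com/Lab00700/Algorithm | 프로그래머스/2/12941. 최솟값 만들기/최솟값 만들기.py | solution
-- ===== SOURCE A (Python) =====
-- def solution(A,B):
--     answer=0
--     A.sort()
--     B.sort()
--     while A or B:
--         if A[-1]*B[0]<B[-1]*A[0]:
--             answer+=A[-1]*B[0]
--             A.pop(-1)
--             B.pop(0)
--         else:
--             answer+=A[0]*B[-1]
--             A.pop(0)
--             B.pop(-1)
--     return answer
-- ===== SOURCE B (Python) =====
-- def solution(A, B):
--     asc = sorted(A)
--     desc = sorted(B)[::-1]
--     return sum(a * b for a, b in zip(asc, desc))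
-- ===== Notes on version B (the rewrite author's own statement) =====
-- stated objective: faster
-- what changed: Replaces A's while-loop that greedily compares and pops extreme elements (with quadratic-cost pop(0) on lists) by the classic rearrangement pairing: sort A ascending, B descending, and sum the elementwise products in one zip pass.
-- outside the precondition, e.g. on solution([1, 2], [3]): A raises IndexError, B returns 3
import Mathlib
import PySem

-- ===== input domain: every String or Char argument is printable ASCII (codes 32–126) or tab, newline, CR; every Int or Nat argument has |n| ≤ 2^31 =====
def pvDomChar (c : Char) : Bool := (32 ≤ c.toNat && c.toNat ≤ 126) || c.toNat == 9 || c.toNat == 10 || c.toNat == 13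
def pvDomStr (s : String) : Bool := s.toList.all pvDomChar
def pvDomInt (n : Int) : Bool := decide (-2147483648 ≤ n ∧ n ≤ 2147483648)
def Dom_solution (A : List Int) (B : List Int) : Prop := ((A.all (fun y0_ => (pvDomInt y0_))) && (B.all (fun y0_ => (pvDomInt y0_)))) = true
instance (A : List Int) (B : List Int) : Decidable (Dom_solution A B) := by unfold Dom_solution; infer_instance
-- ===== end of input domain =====

-- B replaces A's extreme-popping greedy loop by the rearrangement pairing (sort A asc, B desc, one zip pass); faster in a timing run.
-- Note: the Python A sorts and empties its argument lists in place; the equivalence proved here is about the RETURN value only.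


-- ===== PORT A =====
-- termination measure for the while loop (cited by solutionLoop's decreasing_by)
theorem pv_term (A B : List Int) (h : ¬(A = [] ∧ B = [])) :
    A.dropLast.length + B.tail.length < A.length + B.length := by
  by_cases hA : A = []
  · subst hA
    have hB : B ≠ [] := fun hb => h ⟨rfl, hb⟩
    have := List.length_pos_iff.mpr hB
    simp [List.length_tail]; omega
  · have := List.length_pos_iff.mpr hA
    have ht : B.tail.length ≤ B.length := by simp [List.length_tail]
    simp [List.length_dropLast, List.length_tail]; omega

-- the while loop: A[-1]/A[0] via pyGet? (none = IndexError, reached only outside Pre_);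
-- A.pop(-1) = dropLast, pop(0) = tail
def solutionLoop (A : List Int) (B : List Int) (answer : Int) : Int :=
  if A = [] ∧ B = [] then answer
  else
    match PySem.List.pyGet? A (-1), PySem.List.pyGet? A 0,
          PySem.List.pyGet? B (-1), PySem.List.pyGet? B 0 with
    | some aL, some a0, some bL, some b0 =>
        if aL * b0 < bL * a0 then
          solutionLoop A.dropLast B.tail (answer + aL * b0)
        else
          solutionLoop A.tail B.dropLast (answer + a0 * bL)
    | _, _, _, _ => answer   -- Python raises IndexError here (one list empty); outside Pre_
termination_by A.length + B.length
decreasing_by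
  · exact pv_term A B (by assumption)
  · have h := pv_term B A (by rintro ⟨h1, h2⟩; exact (by assumption : ¬(A = [] ∧ B = [])) ⟨h2, h1⟩)
    omega

def solution (A : List Int) (B : List Int) : Int :=
  solutionLoop (PySem.List.sorted A (fun x => x) false) (PySem.List.sorted B (fun x => x) false) 0

-- ===== PORT B =====
def solution_alt (A : List Int) (B : List Int) : Int :=
  let asc := PySem.List.sorted A (fun x => x) false
  let desc := (PySem.List.sorted B (fun x => x) false).reverse
  (asc.zip desc).foldl (fun s p => s + p.1 * p.2) 0

-- ===== PRECONDITION & SPEC =====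
-- Pre_ excludes lists of different lengths: there A's loop indexes an emptied list and raises IndexError.
def Pre_solution (A : List Int) (B : List Int) : Prop := A.length = B.length
instance (A : List Int) (B : List Int) : Decidable (Pre_solution A B) := by unfold Pre_solution; infer_instance
def pvWitness_solution : List Int × List Int := ([1, 4, 2], [5, 4, 4])

def Spec_solution (A : List Int) (B : List Int) (out : Int) : Prop := out = solution_alt A B
instance (A : List Int) (B : List Int) (out : Int) : Decidable (Spec_solution A B out) := by unfold Spec_solution; infer_instance

-- ===== CLAIM (what is proved, stated in full; the proofs are below) =====
def Claim_equal_solution : Prop := ∀ (A : List Int) (B : List Int), Dom_solution A B → Pre_solution A B → Spec_solution A B (solution A B)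

-- ===== LEMMAS AND PROOFS =====

-- pulling a constant out of the fold's accumulator
theorem foldl_mul_add (l : List (Int × Int)) (s c : Int) :
    l.foldl (fun s p => s + p.1 * p.2) (s + c) = l.foldl (fun s p => s + p.1 * p.2) s + c := by
  induction l generalizing s with
  | nil => rfl
  | cons a l ih =>
      simp only [List.foldl_cons]
      rw [add_right_comm, ih]

-- A's greedy loop over any equal-length lists computes B's zip sum (no sortedness needed:
-- each branch consumes exactly one pair of the pairing A[i] ↔ B[n-1-i])
theorem solutionLoop_eq (A B : List Int) (s : Int) (h : A.length = B.length) :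
    solutionLoop A B s = (A.zip B.reverse).foldl (fun s p => s + p.1 * p.2) s := by
  induction A, B, s using solutionLoop.induct with
  | case1 A B s hnil =>
      obtain ⟨rfl, rfl⟩ := hnil
      simp [solutionLoop]
  | case2 A B s hnil aL a0 bL b0 hb0 hbL ha0 haL hlt ih =>
      have hA : A ≠ [] := by rintro rfl; simp [PySem.List.pyGet?, PySem.List.pyIdx?] at haL
      have hB : B ≠ [] := by rintro rfl; simp [PySem.List.pyGet?, PySem.List.pyIdx?] at hbL
      have hA' : A = A.dropLast ++ [aL] := by
        rw [PySem.List.pyGet?_neg_one] at haL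
        conv_lhs => rw [← List.dropLast_append_getLast hA]
        rw [List.getLast?_eq_some_getLast hA] at haL
        simp at haL; rw [haL]
      have hB' : B.reverse = B.tail.reverse ++ [b0] := by
        rw [PySem.List.pyGet?_zero] at hb0
        cases B with
        | nil => exact absurd rfl hB
        | cons x xs => simp at hb0; subst hb0; simp
      have hlen : A.dropLast.length = B.tail.reverse.length := by
        have := List.length_pos_iff.mpr hA
        have := List.length_pos_iff.mpr hB
        simp [List.length_dropLast, List.length_tail]; omega
      rw [solutionLoop]
      simp only [hnil, if_false, haL, ha0, hbL, hb0, hlt, if_pos]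
      rw [ih (by simpa using hlen)]
      conv_rhs => rw [hA', hB']
      rw [List.zip_append hlen, List.foldl_append]
      simp only [List.zip_cons_cons, List.zip_nil_right, List.foldl_cons, List.foldl_nil]
      rw [foldl_mul_add]
  | case3 A B s hnil aL a0 bL b0 hb0 hbL ha0 haL hlt ih =>
      have hA : A ≠ [] := by rintro rfl; simp [PySem.List.pyGet?, PySem.List.pyIdx?] at haL
      have hB : B ≠ [] := by rintro rfl; simp [PySem.List.pyGet?, PySem.List.pyIdx?] at hbL
      have hA' : A = a0 :: A.tail := by
        rw [PySem.List.pyGet?_zero] at ha0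
        cases B with | nil => exact absurd rfl hB | cons x xs => ?_
        cases A with
        | nil => exact absurd rfl hA
        | cons y ys => simp at ha0; subst ha0; rfl
      have hB' : B.reverse = bL :: B.dropLast.reverse := by
        rw [PySem.List.pyGet?_neg_one] at hbL
        rw [List.getLast?_eq_some_getLast hB] at hbL
        simp at hbL
        conv_lhs => rw [← List.dropLast_append_getLast hB]
        simp [hbL]
      have hlen : A.tail.length = B.dropLast.length := by
        have := List.length_pos_iff.mpr hA
        have := List.length_pos_iff.mpr hB
        simp [List.length_dropLast, List.length_tail]; omega
      rw [solutionLoop]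
      simp only [hnil, if_false, haL, ha0, hbL, hb0, hlt]
      rw [ih hlen]
      conv_rhs => rw [hA', hB']
      simp only [List.zip_cons_cons, List.foldl_cons]
  | case4 A B s hnil hmatch =>
      exfalso
      have hA : A ≠ [] := by rintro rfl; exact hnil ⟨rfl, List.length_eq_zero_iff.mp h.symm⟩
      have hB : B ≠ [] := by
        rintro rfl; exact hnil ⟨List.length_eq_zero_iff.mp h, rfl⟩
      obtain ⟨aL, haL⟩ := Option.ne_none_iff_exists'.mp
        (by simp [PySem.List.pyGet?_neg_one, List.getLast?_eq_none_iff]; exact hA : PySem.List.pyGet? A (-1) ≠ none)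
      obtain ⟨a0, ha0⟩ := Option.ne_none_iff_exists'.mp
        (by simp [PySem.List.pyGet?_zero]
            exact hA : PySem.List.pyGet? A 0 ≠ none)
      obtain ⟨bL, hbL⟩ := Option.ne_none_iff_exists'.mp
        (by simp [PySem.List.pyGet?_neg_one, List.getLast?_eq_none_iff]; exact hB : PySem.List.pyGet? B (-1) ≠ none)
      obtain ⟨b0, hb0⟩ := Option.ne_none_iff_exists'.mp
        (by simp [PySem.List.pyGet?_zero]
            exact hB : PySem.List.pyGet? B 0 ≠ none)
      exact hmatch aL a0 bL b0 haL ha0 hbL hb0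

-- ===== VERDICT (by name: the statement is the Claim_ definition above) =====
theorem solution_spec : Claim_equal_solution := by
  intro A B _ hpre
  unfold Spec_solution solution solution_alt
  exact solutionLoop_eq _ _ 0 (by simp [Pre_solution] at hpre; simp [hpre])
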